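-- pv_equiv track=rewrite | github.com/map-lo/DrumEngine01 | preset-from-tci/tci_decoder.py | count_decoded_samples
-- ===== SOURCE A (Python) =====
-- DEFAULT_BLOCK_SIZE = 0xC9
--
-- def read_u8_bits(payload, start_bit):
--     value = 0
--     for j in range(8):
--         bit_index = start_bit + j
--         byte_index = bit_index >> 3
--         shift = 7 - (bit_index & 7)
--         bit = (payload[byte_index] >> shift) & 1
--         value = (value << 1) | bit
--     return value
--
-- def normalize_uvar9(value):
--     if value < 1 or value > 25:
--         return None
--     return value
--
-- def find_valid_start_bit(payload, start_bit, bit_len, max_scan_bytes=16):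
--     if bit_len <= start_bit + 8:
--         return None
--
--     base_byte = start_bit // 8
--     for offset in range(max_scan_bytes + 1):
--         byte_index = base_byte + offset
--         if byte_index >= len(payload):
--             break
--         u_var9 = normalize_uvar9(payload[byte_index])
--         if u_var9 is not None:
--             return start_bit + offset * 8
--     return None
--
-- def count_decoded_samples(payload, bit_len, sample_count, block_size=DEFAULT_BLOCK_SIZE):
--     if sample_count == 0 or bit_len <= 8:
--         return 0
--
--     start_bit = find_valid_start_bit(payload, 0, bit_len)
--     if start_bit is None:
--         return -1
--
--     u_var9 = read_u8_bits(payload, start_bit)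
--     u_var9 = normalize_uvar9(u_var9)
--     if u_var9 is None:
--         return -1
--     bit_pos = start_bit + 8
--     block_count = 0
--     count = 0
--
--     while count < sample_count:
--         if (bit_pos >> 3) + 4 > len(payload):
--             break
--
--         count += 1
--         block_count += 1
--         bit_pos += u_var9
--
--         if block_count >= block_size:
--             byte_index = bit_pos >> 3
--             if byte_index + 2 > len(payload):
--                 break
--             u_var9 = ((payload[byte_index + 1] << 16) | (payload[byte_index] << 24))
--             u_var9 = ((u_var9 << (bit_pos & 7)) & 0xFFFFFFFF) >> 24
--             u_var9 = normalize_uvar9(u_var9)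
--             if u_var9 is None:
--                 return -1
--             bit_pos += 8
--             block_count = 0
--
--         if bit_pos >= bit_len:
--             break
--
--     return count
-- ===== SOURCE B (Python) =====
-- DEFAULT_BLOCK_SIZE = 0xC9
--
-- def count_decoded_samples(payload, bit_len, sample_count, block_size=DEFAULT_BLOCK_SIZE):
--     if sample_count == 0 or bit_len <= 8:
--         return 0
--     L = len(payload)
--     # find the first byte among the first 17 that is a valid step width (1..25)
--     start = None
--     for off in range(min(17, L)):
--         if 1 <= payload[off] <= 25:
--             start = off
--             break
--     if start is None:
--         return -1
--     u = payload[start]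
--     limit = 8 * (L - 3)            # the per-sample loop runs while bit_pos >> 3 <= L - 4
--     pos = 8 * start + 8
--     count = 0
--     while True:
--         r = sample_count - count
--         if r <= 0 or pos >= limit:
--             return count
--         s = block_size if block_size >= 1 else 1   # samples in the current block
--         k2 = (limit - 1 - pos) // u + 1            # samples until the payload runs out
--         ib = max(1, -((pos - bit_len) // u))       # first sample reaching bit_len
--         if ib <= r and ib <= k2 and ib < s:
--             return count + ib
--         if s <= r and s <= k2:
--             # a whole block is consumed at once: jump, then decode the next step width
--             count += s
--             pos += s * u
--             bi = pos // 8
--             if bi + 2 > L: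
--                 return count
--             w = (payload[bi + 1] << 16) | (payload[bi] << 24)
--             w = ((w << (pos % 8)) & 0xFFFFFFFF) >> 24
--             if w < 1 or w > 25:
--                 return -1
--             u = w
--             pos += 8
--             if pos >= bit_len:
--                 return count
--         else:
--             return count + min(r, k2)
-- ===== Notes on version B (the rewrite author's own statement) =====
-- stated objective: alternative
-- what changed: A steps bit positions one sample at a time; B computes per block (where the step width is constant) how many samples fit before the next stopping event via floor/ceiling divisions and jumps over the whole block at once.
import Mathlib
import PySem

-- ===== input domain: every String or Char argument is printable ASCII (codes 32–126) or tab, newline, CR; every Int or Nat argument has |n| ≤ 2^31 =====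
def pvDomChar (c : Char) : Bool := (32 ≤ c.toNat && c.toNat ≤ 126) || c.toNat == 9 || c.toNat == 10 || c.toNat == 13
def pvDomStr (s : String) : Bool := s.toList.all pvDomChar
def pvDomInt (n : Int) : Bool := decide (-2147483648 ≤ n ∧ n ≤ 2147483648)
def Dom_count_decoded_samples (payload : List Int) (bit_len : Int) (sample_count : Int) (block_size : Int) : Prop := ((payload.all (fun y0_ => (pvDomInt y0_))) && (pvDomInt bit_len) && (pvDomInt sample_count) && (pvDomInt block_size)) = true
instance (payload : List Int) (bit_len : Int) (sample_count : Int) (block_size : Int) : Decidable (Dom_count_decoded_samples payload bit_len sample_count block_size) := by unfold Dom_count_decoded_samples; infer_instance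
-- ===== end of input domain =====

-- B replaces A's per-sample bit stepping by per-block arithmetic: within a block the step
-- width is constant, so the number of samples until the next stopping event is a division.

-- ===== PORT A =====
def normalize_uvar9 (value : Int) : Option Int :=
  if value < 1 ∨ value > 25 then none else some value

def read_u8_bits (payload : List Int) (start_bit : Int) : Int :=
  (List.range 8).foldl (fun (value : Int) (j : Nat) =>
    let bit_index := start_bit + (j : Int)
    let byte_index := bit_index >>> (3 : Nat)
    let shift := 7 - PySem.Int.band bit_index 7
    let bit := PySem.Int.band ((PySem.List.pyGetD payload byte_index 0) >>> shift.toNat) 1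
    PySem.Int.bor (value <<< (1 : Nat)) bit) 0

def find_valid_start_bit_go (payload : List Int) (start_bit : Int) (base_byte : Int) :
    Nat → Int → Option Int
  | 0, _ => none
  | n + 1, offset =>
    let byte_index := base_byte + offset
    if byte_index ≥ (payload.length : Int) then none
    else match normalize_uvar9 (PySem.List.pyGetD payload byte_index 0) with
      | some _ => some (start_bit + offset * 8)
      | none => find_valid_start_bit_go payload start_bit base_byte n (offset + 1)

def find_valid_start_bit (payload : List Int) (start_bit : Int) (bit_len : Int) : Option Int :=
  if bit_len ≤ start_bit + 8 then none
  else find_valid_start_bit_go payload start_bit (PySem.Int.floordiv start_bit 8) 17 0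

def count_decoded_samples_loop (payload : List Int) (bit_len sample_count block_size : Int)
    (count block_count bit_pos u_var9 : Int) : Int :=
  if h : count < sample_count then
    if (bit_pos >>> (3 : Nat)) + 4 > (payload.length : Int) then count
    else
      let count' := count + 1
      let block_count' := block_count + 1
      let bit_pos' := bit_pos + u_var9
      if block_count' ≥ block_size then
        let byte_index := bit_pos' >>> (3 : Nat)
        if byte_index + 2 > (payload.length : Int) then count'
        else
          let w := PySem.Int.bor ((PySem.List.pyGetD payload (byte_index + 1) 0) <<< (16 : Nat))
                                 ((PySem.List.pyGetD payload byte_index 0) <<< (24 : Nat))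
          let w := (PySem.Int.band (w <<< (PySem.Int.band bit_pos' 7).toNat) 0xFFFFFFFF) >>> (24 : Nat)
          match normalize_uvar9 w with
          | none => -1
          | some u' =>
            let bit_pos'' := bit_pos' + 8
            if bit_pos'' ≥ bit_len then count'
            else count_decoded_samples_loop payload bit_len sample_count block_size count' 0 bit_pos'' u'
      else
        if bit_pos' ≥ bit_len then count'
        else count_decoded_samples_loop payload bit_len sample_count block_size count' block_count' bit_pos' u_var9
  else count
termination_by (sample_count - count).toNat
decreasing_by all_goals omega

def count_decoded_samples (payload : List Int) (bit_len : Int) (sample_count : Int) (block_size : Int) : Int :=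
  if sample_count = 0 ∨ bit_len ≤ 8 then 0
  else
    match find_valid_start_bit payload 0 bit_len with
    | none => -1
    | some start_bit =>
      match normalize_uvar9 (read_u8_bits payload start_bit) with
      | none => -1
      | some u =>
        count_decoded_samples_loop payload bit_len sample_count block_size 0 0 (start_bit + 8) u

-- ===== PORT B =====
def cds_alt_scan (payload : List Int) : Nat → Nat → Option Nat
  | 0, _ => none
  | fuel + 1, off =>
    if 1 ≤ PySem.List.pyGetD payload (off : Int) 0 ∧ PySem.List.pyGetD payload (off : Int) 0 ≤ 25
    then some off
    else cds_alt_scan payload fuel (off + 1)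

def cds_alt_loop (payload : List Int) (bit_len sample_count block_size L limit : Int)
    (count pos u : Int) : Int :=
  let r := sample_count - count
  if h : r ≤ 0 then count
  else if pos ≥ limit then count
  else
    let s := if block_size ≥ 1 then block_size else 1
    let k2 := PySem.Int.floordiv (limit - 1 - pos) u + 1
    let ib := max 1 (-(PySem.Int.floordiv (pos - bit_len) u))
    if ib ≤ r ∧ ib ≤ k2 ∧ ib < s then count + ib
    else if hs : s ≤ r ∧ s ≤ k2 then
      let count' := count + s
      let pos' := pos + s * u
      let bi := PySem.Int.floordiv pos' 8
      if bi + 2 > L then count'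
      else
        let w := PySem.Int.bor ((PySem.List.pyGetD payload (bi + 1) 0) <<< (16 : Nat))
                               ((PySem.List.pyGetD payload bi 0) <<< (24 : Nat))
        let w := (PySem.Int.band (w <<< (PySem.Int.mod pos' 8).toNat) 0xFFFFFFFF) >>> (24 : Nat)
        if w < 1 ∨ w > 25 then -1
        else
          let pos'' := pos' + 8
          if pos'' ≥ bit_len then count'
          else cds_alt_loop payload bit_len sample_count block_size L limit count' pos'' w
    else count + min r k2
termination_by (sample_count - count).toNat
decreasing_by
  have e : count' = count + s := rfl
  have h2 : (1 : Int) ≤ s := by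
    show (1 : Int) ≤ if block_size ≥ 1 then block_size else 1
    split <;> omega
  have h3 : ¬ (sample_count - count ≤ 0) := h
  have hs1 : s ≤ sample_count - count := hs.1
  omega

def count_decoded_samples_alt (payload : List Int) (bit_len : Int) (sample_count : Int) (block_size : Int) : Int :=
  if sample_count = 0 ∨ bit_len ≤ 8 then 0
  else
    match cds_alt_scan payload (min 17 payload.length) 0 with
    | none => -1
    | some off =>
      let L : Int := payload.length
      cds_alt_loop payload bit_len sample_count block_size L (8 * (L - 3)) 0
        (8 * (off : Int) + 8) (PySem.List.pyGetD payload (off : Int) 0)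

-- ===== PRECONDITION & SPEC =====
def Spec_count_decoded_samples (payload : List Int) (bit_len : Int) (sample_count : Int) (block_size : Int) (out : Int) : Prop := out = count_decoded_samples_alt payload bit_len sample_count block_size
instance (payload : List Int) (bit_len : Int) (sample_count : Int) (block_size : Int) (out : Int) : Decidable (Spec_count_decoded_samples payload bit_len sample_count block_size out) := by unfold Spec_count_decoded_samples; infer_instance

-- ===== CLAIM (what is proved, stated in full; the proofs are below) =====
def Claim_equal_count_decoded_samples : Prop := ∀ (payload : List Int) (bit_len : Int) (sample_count : Int) (block_size : Int), Dom_count_decoded_samples payload bit_len sample_count block_size → Spec_count_decoded_samples payload bit_len sample_count block_size (count_decoded_samples payload bit_len sample_count block_size)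

-- ===== LEMMAS AND PROOFS =====

-- a & 7 is a % 8 for nonnegative a
lemma band7_eq_mod8 (a : Int) (h : 0 ≤ a) : PySem.Int.band a 7 = PySem.Int.mod a 8 := by
  rw [PySem.Int.band_of_nonneg h (by norm_num), PySem.Int.mod_eq_emod_of_pos (by norm_num)]
  have : a.toNat &&& (7:Int).toNat = a.toNat % 8 := Nat.and_two_pow_sub_one_eq_mod a.toNat 3
  rw [this]; omega

-- (v << 1) | b  =  2*v + b  when 0 ≤ v and b is a bit
lemma bor_bit (v b : Int) (hv : 0 ≤ v) (hb : b = 0 ∨ b = 1) :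
    PySem.Int.bor (v <<< (1 : Nat)) b = 2 * v + b := by
  have hvv : (0:Int) ≤ v <<< (1:Nat) := by
    rw [Int.shiftLeft_eq]; positivity
  have hb0 : (0:Int) ≤ b := by rcases hb with h|h <;> omega
  rw [PySem.Int.bor_of_nonneg hvv hb0]
  have hsl : v <<< (1:Nat) = 2 * v := by rw [Int.shiftLeft_eq]; ring
  rcases hb with h|h <;> subst h
  · simp [hsl]; omega
  · have : (2*v).toNat ||| (1:Int).toNat = 2 * v.toNat + 1 := by
      have h2 : (2*v).toNat = 2 * v.toNat := by omega
      have h3 := Nat.lor_bit false v.toNat true 0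
      simp [Nat.bit] at h3
      simp [h2, Int.toNat_one]
      omega
    rw [hsl, this]; omega

-- reading 8 bits at a byte boundary of a byte holding 1..25 returns that byte
lemma read8_aligned (payload : List Int) (k : Nat) (x : Int)
    (hx : PySem.List.pyGetD payload (k : Int) 0 = x) (h1 : 1 ≤ x) (h2 : x ≤ 25) :
    read_u8_bits payload (8 * (k : Int)) = x := by
  have hA : ∀ j : Nat, j < 8 → ((8 * (k : Int) + (j : Int)) >>> (3 : Nat)) = (k : Int) := by
    intro j hj
    rw [Int.shiftRight_eq_div_pow]
    have : ((j:Int)) < 8 := by exact_mod_cast hj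
    have : (0:Int) ≤ (j:Int) := by positivity
    norm_num
    omega
  have hB : ∀ j : Nat, j < 8 → PySem.Int.band (8 * (k : Int) + (j : Int)) 7 = (j : Int) := by
    intro j hj
    rw [band7_eq_mod8 _ (by positivity), PySem.Int.mod_eq_emod_of_pos (by norm_num)]
    have : ((j:Int)) < 8 := by exact_mod_cast hj
    have : (0:Int) ≤ (j:Int) := by positivity
    omega
  unfold read_u8_bits
  rw [show List.range 8 = [0,1,2,3,4,5,6,7] from rfl]
  simp only [List.foldl_cons, List.foldl_nil]
  rw [hA 0 (by norm_num), hA 1 (by norm_num), hA 2 (by norm_num), hA 3 (by norm_num),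
      hA 4 (by norm_num), hA 5 (by norm_num), hA 6 (by norm_num), hA 7 (by norm_num),
      hB 0 (by norm_num), hB 1 (by norm_num), hB 2 (by norm_num), hB 3 (by norm_num),
      hB 4 (by norm_num), hB 5 (by norm_num), hB 6 (by norm_num), hB 7 (by norm_num), hx]
  simp only [PySem.Int.band_one]
  simp only [PySem.Int.mod_eq_emod_of_pos (show (0:Int) < 2 by norm_num)]
  simp only [Int.shiftRight_eq_div_pow]
  norm_num [show Int.toNat 7 = 7 from rfl, show Int.toNat 6 = 6 from rfl, show Int.toNat 5 = 5 from rfl,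
            show Int.toNat 4 = 4 from rfl, show Int.toNat 3 = 3 from rfl, show Int.toNat 2 = 2 from rfl]
  generalize hb7 : x / 128 % 2 = b7
  generalize hb6 : x / 64 % 2 = b6
  generalize hb5 : x / 32 % 2 = b5
  generalize hb4 : x / 16 % 2 = b4
  generalize hb3 : x / 8 % 2 = b3
  generalize hb2 : x / 4 % 2 = b2
  generalize hb1 : x / 2 % 2 = b1
  generalize hb0 : x % 2 = b0
  rw [PySem.Int.bor_comm 0 b7, PySem.Int.bor_zero,
      bor_bit b7 b6 (by omega) (by omega),
      bor_bit (2*b7+b6) b5 (by omega) (by omega),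
      bor_bit (2*(2*b7+b6)+b5) b4 (by omega) (by omega),
      bor_bit (2*(2*(2*b7+b6)+b5)+b4) b3 (by omega) (by omega),
      bor_bit (2*(2*(2*(2*b7+b6)+b5)+b4)+b3) b2 (by omega) (by omega),
      bor_bit (2*(2*(2*(2*(2*b7+b6)+b5)+b4)+b3)+b2) b1 (by omega) (by omega),
      bor_bit (2*(2*(2*(2*(2*(2*b7+b6)+b5)+b4)+b3)+b2)+b1) b0 (by omega) (by omega)]
  omega

-- A's scan equals B's scan
lemma scan_eq (payload : List Int) : ∀ (f k : Nat),
    find_valid_start_bit_go payload 0 0 f (k : Int)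
      = Option.map (fun o => ((o : Int) * 8)) (cds_alt_scan payload (min f (payload.length - k)) k) := by
  intro f
  induction f with
  | zero => intro k; simp [find_valid_start_bit_go, cds_alt_scan]
  | succ n ih =>
    intro k
    rw [find_valid_start_bit_go]
    by_cases hk : k < payload.length
    · have hge : ¬ ((0:Int) + (k:Int) ≥ (payload.length : Int)) := by push_cast; omega
      rw [if_neg hge]
      have hmin : min (n+1) (payload.length - k) = (min n (payload.length - (k+1))) + 1 := by omega
      rw [hmin, cds_alt_scan]
      have hz : (0:Int) + (k:Int) = (k:Int) := by ring
      rw [hz]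
      unfold normalize_uvar9
      by_cases hv : PySem.List.pyGetD payload (k:Int) 0 < 1 ∨ PySem.List.pyGetD payload (k:Int) 0 > 25
      · rw [if_pos hv, if_neg (by omega)]
        rw [show (k:Int) + 1 = ((k+1 : Nat) : Int) by omega]
        exact ih (k+1)
      · rw [if_neg hv, if_pos (by omega)]
        simp
    · have hge : ((0:Int) + (k:Int) ≥ (payload.length : Int)) := by push_cast; omega
      rw [if_pos hge]
      have hmin : min (n+1) (payload.length - k) = 0 := by omega
      rw [hmin]
      simp [cds_alt_scan]

-- single non-rollover step of A's loop
lemma loop_step (payload : List Int) (bit_len sample_count block_size : Int)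
    (count bc pos u : Int)
    (h1 : count < sample_count)
    (h2 : ¬ ((pos >>> (3:Nat)) + 4 > (payload.length : Int)))
    (h3 : ¬ (bc + 1 ≥ block_size))
    (h4 : ¬ (pos + u ≥ bit_len)) :
    count_decoded_samples_loop payload bit_len sample_count block_size count bc pos u
      = count_decoded_samples_loop payload bit_len sample_count block_size (count+1) (bc+1) (pos+u) u := by
  rw [count_decoded_samples_loop]
  simp only [dif_pos h1, if_neg h2, if_neg h3, if_neg h4]

-- A's loop stepped j times inside one block
lemma seg (payload : List Int) (bit_len sample_count block_size u : Int) (hu : 1 ≤ u) :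
    ∀ (j : Nat) (count bc pos : Int),
    count + j ≤ sample_count →
    (∀ i : Nat, i < j → pos + i * u < 8 * ((payload.length : Int) - 3)) →
    (∀ i : Nat, 1 ≤ i → i ≤ j → bc + i < block_size) →
    (∀ i : Nat, 1 ≤ i → i ≤ j → pos + i * u < bit_len) →
    count_decoded_samples_loop payload bit_len sample_count block_size count bc pos u
      = count_decoded_samples_loop payload bit_len sample_count block_size (count + j) (bc + j) (pos + j * u) u := by
  intro j
  induction j with
  | zero => intro count bc pos _ _ _ _; norm_num
  | succ n ihn =>
    intro count bc pos hcnt hlim hbc hbl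
    have h1 : count < sample_count := by push_cast at hcnt; omega
    have h2 : ¬ ((pos >>> (3:Nat)) + 4 > (payload.length : Int)) := by
      have h := hlim 0 (by omega)
      push_cast at h
      rw [Int.shiftRight_eq_div_pow]
      norm_num
      omega
    have h3 : ¬ (bc + 1 ≥ block_size) := by
      have h := hbc 1 (by omega) (by omega); push_cast at h; omega
    have h4 : ¬ (pos + u ≥ bit_len) := by
      have h := hbl 1 (by omega) (by omega); push_cast at h
      have e : pos + 1 * u = pos + u := by ring
      omega
    rw [loop_step _ _ _ _ _ _ _ _ h1 h2 h3 h4]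
    rw [ihn (count+1) (bc+1) (pos+u)
      (by push_cast at hcnt ⊢; omega)
      (by intro i hi
          have h := hlim (i+1) (by omega); push_cast at h ⊢
          have e : pos + u + (i:Int) * u = pos + ((i:Int)+1) * u := by ring
          rw [e]; exact h)
      (by intro i hi1 hi2
          have h := hbc (i+1) (by omega) (by omega); push_cast at h ⊢; omega)
      (by intro i hi1 hi2
          have h := hbl (i+1) (by omega) (by omega); push_cast at h ⊢
          have e : pos + u + (i:Int) * u = pos + ((i:Int)+1) * u := by ring
          rw [e]; exact h)]
    congr 1 <;> push_cast <;> ring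

-- core: A's per-sample loop equals B's per-block loop (fuel-indexed strong induction)
lemma loop_eq_aux (payload : List Int) (bit_len sample_count block_size : Int) :
    ∀ (n : Nat) (count pos u : Int), (sample_count - count).toNat = n → 1 ≤ u → u ≤ 25 → 0 ≤ pos →
    count_decoded_samples_loop payload bit_len sample_count block_size count 0 pos u
      = cds_alt_loop payload bit_len sample_count block_size (payload.length : Int)
          (8 * ((payload.length : Int) - 3)) count pos u := by
  intro n
  induction n using Nat.strong_induction_on with
  | _ n ih =>
  intro count pos u hn hu1 hu2 hpos
  have hsh : ∀ p : Int, (p >>> (3:Nat)) = p / 8 := by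
    intro p; rw [Int.shiftRight_eq_div_pow]; norm_num
  rw [cds_alt_loop]
  by_cases h0 : sample_count - count ≤ 0
  · rw [dif_pos h0, count_decoded_samples_loop, dif_neg (by omega)]
  rw [dif_neg h0]
  by_cases hlim : pos ≥ 8 * ((payload.length : Int) - 3)
  · rw [if_pos hlim, count_decoded_samples_loop, dif_pos (by omega),
        if_pos (by rw [hsh]; omega)]
  rw [if_neg hlim]
  simp only []
  set L : Int := (payload.length : Int) with hL
  set s : Int := if block_size ≥ 1 then block_size else 1 with hs
  set k2 : Int := PySem.Int.floordiv (8 * (L - 3) - 1 - pos) u + 1 with hk2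
  set ib : Int := max 1 (-PySem.Int.floordiv (pos - bit_len) u) with hib
  have hu0 : (0:Int) < u := by omega
  -- brackets for k2
  have ht1 : (k2 - 1) * u ≤ 8 * (L - 3) - 1 - pos := by
    have h := (PySem.Int.le_floordiv_iff_mul_le (a := 8 * (L - 3) - 1 - pos) (b := u)
      (q := PySem.Int.floordiv (8 * (L - 3) - 1 - pos) u) hu0).1 le_rfl
    rw [hk2]; ring_nf; ring_nf at h; omega
  have ht2 : 8 * (L - 3) - 1 - pos < k2 * u := by
    have h := (PySem.Int.floordiv_lt_iff_lt_mul (a := 8 * (L - 3) - 1 - pos) (b := u)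
      (q := PySem.Int.floordiv (8 * (L - 3) - 1 - pos) u + 1) hu0).1 (by omega)
    rw [hk2]
    exact h
  have hk2pos : 1 ≤ k2 := by
    rw [hk2]
    have h := (PySem.Int.le_floordiv_iff_mul_le (a := 8 * (L - 3) - 1 - pos) (b := u)
      (q := 0) hu0).2 (by omega)
    omega
  -- brackets for ib
  have hcb : (-PySem.Int.floordiv (pos - bit_len) u - 1) * u < bit_len - pos ∧
      bit_len - pos ≤ (-PySem.Int.floordiv (pos - bit_len) u) * u := by
    have h := (PySem.Int.neg_floordiv_neg_eq_iff_of_pos (a := bit_len - pos) (b := u)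
      (q := -PySem.Int.floordiv (pos - bit_len) u) hu0).1
      (by rw [show -(bit_len - pos) = pos - bit_len by ring])
    exact ⟨by have := h.1; linarith, h.2⟩
  have hibpos : 1 ≤ ib := by rw [hib]; omega
  -- step-bound helpers
  have hlim_lt : ∀ i : Int, 0 ≤ i → i < k2 → pos + i * u < 8 * (L - 3) := by
    intro i h1 h2
    have : i * u ≤ (k2 - 1) * u := by
      apply mul_le_mul_of_nonneg_right (by omega) (by omega)
    linarith
  have hk2_ge : pos + k2 * u ≥ 8 * (L - 3) := by omega
  have hbl_lt : ∀ i : Int, 1 ≤ i → i < ib → pos + i * u < bit_len := by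
    intro i h1 h2
    have hib2 : ib = -PySem.Int.floordiv (pos - bit_len) u := by rw [hib] at h2 ⊢; omega
    have : i * u ≤ (ib - 1) * u := by
      apply mul_le_mul_of_nonneg_right (by omega) (by omega)
    rw [hib2] at this
    have := hcb.1
    linarith
  have hib_ge : pos + ib * u ≥ bit_len := by
    by_cases h : 1 ≤ -PySem.Int.floordiv (pos - bit_len) u
    · have hib2 : ib = -PySem.Int.floordiv (pos - bit_len) u := by rw [hib]; omega
      rw [hib2]; have := hcb.2; linarith
    · have hib2 : ib = 1 := by rw [hib]; omega
      have hnp : (-PySem.Int.floordiv (pos - bit_len) u) * u ≤ 0 :=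
        mul_nonpos_of_nonpos_of_nonneg (by omega) (by omega)
      have := hcb.2
      rw [hib2]; linarith
  by_cases hbr1 : ib ≤ sample_count - count ∧ ib ≤ k2 ∧ ib < s
  · -- early bit_len break inside the current block
    rw [if_pos hbr1]
    obtain ⟨hb1, hb2, hb3⟩ := hbr1
    have hbs1 : 1 ≤ block_size := by
      by_contra hc
      rw [hs, if_neg (by omega)] at hb3; omega
    have hsbs : s = block_size := by rw [hs, if_pos (by omega)]
    have hj : ((ib - 1).toNat : Int) = ib - 1 := Int.toNat_of_nonneg (by omega)
    rw [seg payload bit_len sample_count block_size u hu1 (ib - 1).toNat count 0 pos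
      (by rw [hj]; omega)
      (by intro i hi
          apply hlim_lt _ (by positivity)
          have : (i : Int) < ib - 1 := by omega
          omega)
      (by intro i hi1 hi2
          have : (i : Int) ≤ ib - 1 := by omega
          rw [hsbs] at hb3; omega)
      (by intro i hi1 hi2
          apply hbl_lt _ (by exact_mod_cast hi1)
          have : (i : Int) ≤ ib - 1 := by omega
          omega)]
    rw [hj, count_decoded_samples_loop, dif_pos (by omega),
        if_neg (by rw [hsh]; have := hlim_lt (ib - 1) (by omega) (by omega); omega),
        if_neg (by rw [hsbs] at hb3; omega),
        if_pos (by have := hib_ge; have e : pos + (ib - 1) * u + u = pos + ib * u := by ring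
                   omega)]
    ring
  rw [if_neg hbr1]
  by_cases hbr2 : s ≤ sample_count - count ∧ s ≤ k2
  · -- a full block is consumed: rollover
    rw [dif_pos hbr2]
    obtain ⟨hb1, hb2⟩ := hbr2
    have hspos : 1 ≤ s := by rw [hs]; split <;> omega
    have hsbs : s ≥ block_size := by rw [hs]; split <;> omega
    have hibs : s ≤ ib := by
      by_contra hc
      exact hbr1 ⟨by omega, by omega, by omega⟩
    have hj : ((s - 1).toNat : Int) = s - 1 := Int.toNat_of_nonneg (by omega)
    rw [seg payload bit_len sample_count block_size u hu1 (s - 1).toNat count 0 pos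
      (by rw [hj]; omega)
      (by intro i hi
          apply hlim_lt _ (by positivity)
          have : (i : Int) < s - 1 := by omega
          omega)
      (by intro i hi1 hi2
          have h1 : (i : Int) ≤ s - 1 := by omega
          rw [hs] at h1; split at h1 <;> omega)
      (by intro i hi1 hi2
          apply hbl_lt _ (by exact_mod_cast hi1)
          have : (i : Int) ≤ s - 1 := by omega
          omega)]
    rw [hj, count_decoded_samples_loop, dif_pos (by omega),
        if_neg (by rw [hsh]; have := hlim_lt (s - 1) (by omega) (by omega); omega),
        if_pos (by omega)]
    simp only []
    have e1 : pos + (s - 1) * u + u = pos + s * u := by ring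
    have e2 : count + (s - 1) + 1 = count + s := by ring
    rw [e1, e2]
    have hp' : (0:Int) ≤ pos + s * u := by
      have : (0:Int) ≤ s * u := mul_nonneg (by omega) (by omega)
      omega
    have e3 : (pos + s * u) >>> (3:Nat) = PySem.Int.floordiv (pos + s * u) 8 := by
      rw [hsh, PySem.Int.floordiv_eq_ediv_of_pos (by norm_num)]
    rw [e3]
    by_cases hby : PySem.Int.floordiv (pos + s * u) 8 + 2 > L
    · rw [if_pos hby, if_pos hby]
    rw [if_neg hby, if_neg hby]
    rw [band7_eq_mod8 _ hp']
    unfold normalize_uvar9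
    set w : Int := (PySem.Int.band
      (PySem.Int.bor (PySem.List.pyGetD payload (PySem.Int.floordiv (pos + s * u) 8 + 1) 0 <<< (16:Nat))
        (PySem.List.pyGetD payload (PySem.Int.floordiv (pos + s * u) 8) 0 <<< (24:Nat)) <<<
          (PySem.Int.mod (pos + s * u) 8).toNat) 4294967295) >>> (24:Nat) with hw
    by_cases hwv : w < 1 ∨ w > 25
    · rw [if_pos hwv, if_pos hwv]
    rw [if_neg hwv, if_neg hwv]
    simp only []
    by_cases hbl2 : pos + s * u + 8 ≥ bit_len
    · rw [if_pos hbl2, if_pos hbl2]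
    rw [if_neg hbl2, if_neg hbl2]
    exact ih (sample_count - (count + s)).toNat (by omega) (count + s) (pos + s * u + 8) w
      rfl (by omega) (by omega) (by omega)
  · -- budget or payload runs out before the block ends
    rw [dif_neg hbr2]
    have hm1 : 1 ≤ sample_count - count := by omega
    have hmlt : min (sample_count - count) k2 < s := by
      rcases not_and_or.1 hbr2 with h | h <;> omega
    have hbs1 : 1 ≤ block_size := by
      by_contra hc
      rw [hs, if_neg (by omega)] at hmlt
      omega
    have hsbs : s = block_size := by rw [hs, if_pos (by omega)]
    have hibm : min (sample_count - count) k2 < ib := by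
      by_contra hc
      have hc : min (sample_count - count) k2 ≥ ib := not_lt.1 hc
      by_cases h : s ≤ ib
      · exact hbr2 ⟨by omega, by omega⟩
      · exact hbr1 ⟨by omega, by omega, by omega⟩
    set m : Int := min (sample_count - count) k2 with hm
    have hj : ((m).toNat : Int) = m := Int.toNat_of_nonneg (by omega)
    rw [seg payload bit_len sample_count block_size u hu1 m.toNat count 0 pos
      (by rw [hj]; omega)
      (by intro i hi
          apply hlim_lt _ (by positivity)
          have : (i : Int) < m := by omega
          omega)
      (by intro i hi1 hi2
          have : (i : Int) ≤ m := by omega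
          rw [hsbs] at hmlt; omega)
      (by intro i hi1 hi2
          apply hbl_lt _ (by exact_mod_cast hi1)
          have : (i : Int) ≤ m := by omega
          omega)]
    rw [hj]
    by_cases hrk : sample_count - count ≤ k2
    · have hmr : m = sample_count - count := by omega
      rw [count_decoded_samples_loop, dif_neg (by omega)]
    · have hmk : m = k2 := by omega
      rw [count_decoded_samples_loop, dif_pos (by omega),
          if_pos (by rw [hsh]
                     have := hk2_ge
                     have e : pos + m * u = pos + k2 * u := by rw [hmk]
                     omega)]

lemma loop_eq (payload : List Int) (bit_len sample_count block_size : Int) :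
    ∀ (count pos u : Int), 1 ≤ u → u ≤ 25 → 0 ≤ pos →
    count_decoded_samples_loop payload bit_len sample_count block_size count 0 pos u
      = cds_alt_loop payload bit_len sample_count block_size (payload.length : Int)
          (8 * ((payload.length : Int) - 3)) count pos u := by
  intro count pos u h1 h2 h3
  exact loop_eq_aux payload bit_len sample_count block_size (sample_count - count).toNat
    count pos u rfl h1 h2 h3

-- a successful scan returns an index holding a value in 1..25
lemma scan_sound (payload : List Int) : ∀ (f k off : Nat), cds_alt_scan payload f k = some off →
    1 ≤ PySem.List.pyGetD payload (off : Int) 0 ∧ PySem.List.pyGetD payload (off : Int) 0 ≤ 25 := by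
  intro f
  induction f with
  | zero => intro k off h; simp [cds_alt_scan] at h
  | succ n ih =>
    intro k off h
    rw [cds_alt_scan] at h
    split_ifs at h with hc
    · obtain rfl : k = off := Option.some.inj h
      exact ⟨by omega, by omega⟩
    · exact ih _ _ h

-- ===== VERDICT (by name: the statement is the Claim_ definition above) =====
theorem count_decoded_samples_spec : Claim_equal_count_decoded_samples := by
  intro payload bit_len sample_count block_size _
  unfold Spec_count_decoded_samples
  rw [count_decoded_samples, count_decoded_samples_alt]
  by_cases h8 : sample_count = 0 ∨ bit_len ≤ 8
  · rw [if_pos h8, if_pos h8]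
  rw [if_neg h8, if_neg h8]
  rw [find_valid_start_bit, if_neg (by omega : ¬ bit_len ≤ 0 + 8)]
  rw [show PySem.Int.floordiv 0 8 = 0 by decide]
  have hs := scan_eq payload 17 0
  norm_num at hs
  rw [hs]
  cases hscan : cds_alt_scan payload (min 17 payload.length) 0 with
  | none => simp
  | some off =>
    rw [show (Option.some off).bind (fun a => Option.some ((a : Int) * 8)) = Option.some ((off : Int) * 8) from rfl]
    simp only []
    obtain ⟨hx1, hx2⟩ := scan_sound payload _ _ _ hscan
    rw [show ((off : Int) * 8) = 8 * (off : Int) by ring]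
    rw [read8_aligned payload off _ rfl hx1 hx2]
    rw [normalize_uvar9, if_neg (by omega)]
    simp only []
    exact loop_eq payload bit_len sample_count block_size 0 (8 * (off : Int) + 8) _
      (by omega) (by omega) (by positivity)
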